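-- pv_equiv track=rewrite | github.com/yangxiaomaomao/Multi-Jobs-Simulator | utils.py | put_balls_in_boxes
-- ===== SOURCE A (Python) =====
-- def put_balls_in_boxes(l, n):
--     def helper(n, l, path, result):
--         if n == 0:
--             result.append(path)
--             return
--         if not l:
--             return
--         for i in range(min(n, l[0]) + 1):
--             helper(n - i, l[1:], path + [i], result)
--
--     result = []
--     helper(n, l, [], result)
--     return result
-- ===== SOURCE B (Python) =====
-- def put_balls_in_boxes(l, n):
--     # Iterative level-synchronous rewriting instead of recursive DFS: one pass
--     # over l keeps a work list of (done, remaining, path) states, expanding each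
--     # active state in place (so DFS output order is preserved), then filters the
--     # done states.  States whose remaining exceeds the total capacity of the
--     # yet-unprocessed boxes can never finish and are pruned; pruning only drops
--     # states that contribute nothing, so the result is unchanged.
--     def expand(s, cap, bound):
--         done, rem, path = s
--         if done:
--             return [s]
--         return [(rem - i == 0, rem - i, path + [i])
--                 for i in range(min(rem, cap) + 1) if rem - i <= bound]
--
--     total = sum(max(c, 0) for c in l)
--     states = [(n == 0, n, [])] if n <= total else []
--     for cap in l:
--         total -= max(cap, 0)
--         states = [t for s in states for t in expand(s, cap, total)]
--     return [s[2] for s in states if s[0]]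
-- ===== Notes on version B (the rewrite author's own statement) =====
-- stated objective: alternative
-- what changed: Replaces the recursive DFS with a path/result accumulator by an iterative level-synchronous rewriting: a single fold over the box list keeps a work list of (done, remaining, path) states, expanding each active state in place so the DFS output order is preserved, then filters the done states; states whose remaining balls exceed the total capacity of the unprocessed boxes are pruned (they contribute nothing), which avoids exploring doomed subtrees.
import Mathlib
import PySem

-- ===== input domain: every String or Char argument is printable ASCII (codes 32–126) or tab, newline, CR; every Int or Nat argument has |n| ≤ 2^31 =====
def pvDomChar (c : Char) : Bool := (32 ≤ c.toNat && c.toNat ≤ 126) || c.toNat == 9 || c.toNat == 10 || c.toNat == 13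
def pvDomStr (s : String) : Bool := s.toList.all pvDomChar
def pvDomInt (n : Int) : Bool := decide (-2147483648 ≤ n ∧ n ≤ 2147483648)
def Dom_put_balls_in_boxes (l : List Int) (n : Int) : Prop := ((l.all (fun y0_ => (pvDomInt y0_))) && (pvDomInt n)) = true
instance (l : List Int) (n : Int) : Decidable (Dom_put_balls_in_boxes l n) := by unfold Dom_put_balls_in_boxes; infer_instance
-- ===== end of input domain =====

-- B replaces A's recursive DFS (mutable result accumulator) by an iterative
-- level-synchronous rewriting of a work list of (done, remaining, path) states,
-- pruning states that can never finish (objective: alternative).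

-- ===== PORT A =====
-- 'def helper(n, l, path, result)': result is mutated by append; ported as a
-- threaded accumulator returned by the function.
def pvHelperA (n : Int) (l : List Int) (path : List Int) (result : List (List Int)) :
    List (List Int) :=
  if n = 0 then result ++ [path]
  else
    match l with
    | [] => result
    | c :: rest =>
      (PySem.List.pyRange 0 (min n c + 1) 1).foldl
        (fun acc i => pvHelperA (n - i) rest (path ++ [i]) acc) result
termination_by l.length
decreasing_by simp

def put_balls_in_boxes (l : List Int) (n : Int) : List (List Int) :=
  pvHelperA n l [] []

-- ===== PORT B =====
-- 'def expand(s, cap, bound)' of Source B (comprehension with a filter)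
def pvExpandB (cap bound : Int) (s : Bool × Int × List Int) : List (Bool × Int × List Int) :=
  if s.1 then [s]
  else ((PySem.List.pyRange 0 (min s.2.1 cap + 1) 1).filter
          (fun i => decide (s.2.1 - i ≤ bound))).map
        (fun i => (decide (s.2.1 - i = 0), s.2.1 - i, s.2.2 ++ [i]))

def put_balls_in_boxes_alt (l : List Int) (n : Int) : List (List Int) :=
  let total := (l.map (fun c => max c 0)).sum
  let init : List (Bool × Int × List Int) :=
    if n ≤ total then [(decide (n = 0), n, [])] else []
  let res :=
    l.foldl
      (fun (st : Int × List (Bool × Int × List Int)) cap =>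
        (st.1 - max cap 0, st.2.flatMap (pvExpandB cap (st.1 - max cap 0))))
      (total, init)
  (res.2.filter (fun s => s.1)).map (fun s => s.2.2)

-- ===== PRECONDITION & SPEC =====
def Spec_put_balls_in_boxes (l : List Int) (n : Int) (out : List (List Int)) : Prop := out = put_balls_in_boxes_alt l n
instance (l : List Int) (n : Int) (out : List (List Int)) : Decidable (Spec_put_balls_in_boxes l n out) := by unfold Spec_put_balls_in_boxes; infer_instance

-- ===== CLAIM (what is proved, stated in full; the proofs are below) =====
def Claim_equal_put_balls_in_boxes : Prop := ∀ (l : List Int) (n : Int), Dom_put_balls_in_boxes l n → Spec_put_balls_in_boxes l n (put_balls_in_boxes l n)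

-- ===== LEMMAS AND PROOFS =====

-- common specification: the DFS tree of results, as a pure function
def pvG (n : Int) (l : List Int) (path : List Int) : List (List Int) :=
  if n = 0 then [path]
  else
    match l with
    | [] => []
    | c :: rest =>
      (PySem.List.pyRange 0 (min n c + 1) 1).flatMap (fun i => pvG (n - i) rest (path ++ [i]))
termination_by l.length
decreasing_by simp

theorem pvHelperA_eq_pvG (l : List Int) (n : Int) (path : List Int)
    (result : List (List Int)) :
    pvHelperA n l path result = result ++ pvG n l path := by
  induction l generalizing n path result with
  | nil =>
    by_cases h : n = 0 <;> simp [pvHelperA, pvG, h]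
  | cons c rest ih =>
    by_cases h : n = 0
    · simp [pvHelperA, pvG, h]
    · rw [pvHelperA, pvG]
      simp only [h, if_false]
      rw [PySem.List.foldl_congr_mem _ _
            (fun acc i => acc ++ pvG (n - i) rest (path ++ [i])) _
            (fun acc x _ => ih (n - x) (path ++ [x]) acc),
          PySem.List.foldl_append_eq_flatMap]

-- a state with more remaining balls than the total capacity yields nothing
theorem pvG_vanish (l : List Int) (rem : Int) (path : List Int)
    (h : (l.map (fun c => max c 0)).sum < rem) :
    pvG rem l path = [] := by
  induction l generalizing rem path with
  | nil =>
    have : rem ≠ 0 := by simp at h; omega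
    simp [pvG, this]
  | cons c rest ih =>
    have h0 : (0 : Int) ≤ (rest.map (fun c => max c 0)).sum := by
      apply List.sum_nonneg; intro x hx
      simp only [List.mem_map] at hx
      obtain ⟨y, _, hy⟩ := hx; omega
    have hne : rem ≠ 0 := by simp at h; omega
    rw [pvG]; simp only [hne, if_false]
    rw [List.flatMap_congr (g := fun _ => ([] : List (List Int)))]
    · simp
    · intro i hi
      rw [PySem.List.mem_pyRange_one] at hi
      apply ih
      simp at h; omega

-- the one-level transition of B's fold
def pvStepB (st : Int × List (Bool × Int × List Int)) (cap : Int) :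
    Int × List (Bool × Int × List Int) :=
  (st.1 - max cap 0, st.2.flatMap (pvExpandB cap (st.1 - max cap 0)))

theorem pvStepB_foldl_append (l : List Int) (t : Int)
    (as bs : List (Bool × Int × List Int)) :
    (l.foldl pvStepB (t, as ++ bs)).2 =
      (l.foldl pvStepB (t, as)).2 ++ (l.foldl pvStepB (t, bs)).2 := by
  induction l generalizing t as bs with
  | nil => rfl
  | cons c rest ih =>
    simp only [List.foldl_cons]
    rw [show pvStepB (t, as ++ bs) c
          = (t - max c 0, (pvStepB (t, as) c).2 ++ (pvStepB (t, bs) c).2) by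
        simp [pvStepB, List.flatMap_append]]
    rw [ih]
    rfl

theorem pvStepB_foldl_nil (l : List Int) (t : Int) :
    (l.foldl pvStepB (t, [])).2 = [] := by
  induction l generalizing t with
  | nil => rfl
  | cons c rest ih => simpa [pvStepB] using ih _

theorem pvStepB_foldl_done (l : List Int) (t : Int) (s : Bool × Int × List Int)
    (h : s.1 = true) :
    (l.foldl pvStepB (t, [s])).2 = [s] := by
  induction l generalizing t with
  | nil => rfl
  | cons c rest ih =>
    simp only [List.foldl_cons]
    rw [show pvStepB (t, [s]) c = (t - max c 0, [s]) by simp [pvStepB, pvExpandB, h]]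
    exact ih _

-- extract the finished paths of a state list
def pvFinish (sts : List (Bool × Int × List Int)) : List (List Int) :=
  (sts.filter (fun s => s.1)).map (fun s => s.2.2)

theorem pvFinish_append (as bs : List (Bool × Int × List Int)) :
    pvFinish (as ++ bs) = pvFinish as ++ pvFinish bs := by
  simp [pvFinish]

theorem pvFinish_foldl_map (l : List Int) (t : Int) (r : List Int)
    (f : Int → Bool × Int × List Int) :
    pvFinish ((l.foldl pvStepB (t, r.map f)).2) =
      r.flatMap (fun i => pvFinish ((l.foldl pvStepB (t, [f i])).2)) := by
  induction r with
  | nil => simp [pvStepB_foldl_nil, pvFinish]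
  | cons a r ih =>
    rw [List.map_cons, show (f a :: r.map f) = [f a] ++ r.map f from rfl,
        pvStepB_foldl_append, pvFinish_append, ih, List.flatMap_cons]

-- dropping elements that map to [] does not change a flatMap
theorem pvFlatMap_filter (r : List Int) (p : Int → Bool) (g : Int → List (List Int))
    (h : ∀ x ∈ r, p x = false → g x = []) :
    (r.filter p).flatMap g = r.flatMap g := by
  induction r with
  | nil => rfl
  | cons a r ih =>
    by_cases ha : p a = true
    · rw [List.filter_cons_of_pos ha, List.flatMap_cons, List.flatMap_cons,
          ih (fun x hx => h x (List.mem_cons_of_mem a hx))]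
    · rw [List.filter_cons_of_neg ha, List.flatMap_cons,
          h a (List.mem_cons_self) (by simpa using ha),
          ih (fun x hx => h x (List.mem_cons_of_mem a hx))]
      simp

-- B's fold on one surviving active-or-done state computes pvG
theorem pvFoldB_single (l : List Int) (rem : Int) (path : List Int) :
    pvFinish ((l.foldl pvStepB ((l.map (fun c => max c 0)).sum,
        [(decide (rem = 0), rem, path)])).2) = pvG rem l path := by
  induction l generalizing rem path with
  | nil =>
    by_cases h : rem = 0 <;> simp [pvFinish, pvG, h]
  | cons c rest ih =>
    by_cases h : rem = 0
    · rw [List.foldl_cons,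
          show pvStepB (((c :: rest).map (fun c => max c 0)).sum,
              [(decide (rem = 0), rem, path)]) c
            = ((rest.map (fun c => max c 0)).sum, [(decide (rem = 0), rem, path)]) by
            simp [pvStepB, pvExpandB, h],
          pvStepB_foldl_done rest _ _ (by simp [h]), pvG.eq_def]
      simp [pvFinish, h]
    · rw [List.foldl_cons,
          show pvStepB (((c :: rest).map (fun c => max c 0)).sum,
              [(decide (rem = 0), rem, path)]) c
            = ((rest.map (fun c => max c 0)).sum,
               ((PySem.List.pyRange 0 (min rem c + 1) 1).filter
                  (fun i => decide (rem - i ≤ (rest.map (fun c => max c 0)).sum))).map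
                (fun i => (decide (rem - i = 0), rem - i, path ++ [i]))) by
            simp [pvStepB, pvExpandB, h],
          pvFinish_foldl_map, pvG]
      simp only [h, if_false]
      rw [List.flatMap_congr
            (g := fun i => pvFinish ((rest.foldl pvStepB
              ((rest.map (fun c => max c 0)).sum,
               [(decide (rem - i = 0), rem - i, path ++ [i])])).2))
            (fun i _ => rfl)]
      rw [pvFlatMap_filter _ _ _
            (fun i _ hdrop => by
              rw [ih (rem - i) (path ++ [i]),
                  pvG_vanish rest (rem - i) (path ++ [i]) (by simp at hdrop; omega)])]
      exact List.flatMap_congr (fun i _ => ih (rem - i) (path ++ [i]))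

-- ===== VERDICT (by name: the statement is the Claim_ definition above) =====
theorem put_balls_in_boxes_spec : Claim_equal_put_balls_in_boxes := by
  intro l n _
  show put_balls_in_boxes l n = put_balls_in_boxes_alt l n
  have hA : put_balls_in_boxes l n = pvG n l [] := by
    simpa using pvHelperA_eq_pvG l n [] []
  by_cases hle : n ≤ (l.map (fun c => max c 0)).sum
  · have hB : put_balls_in_boxes_alt l n = pvG n l [] := by
      have := pvFoldB_single l n []
      simpa [put_balls_in_boxes_alt, pvFinish, pvStepB, hle] using this
    rw [hA, hB]
  · have hB : put_balls_in_boxes_alt l n = [] := by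
      have := pvStepB_foldl_nil l ((l.map (fun c => max c 0)).sum)
      simp only [put_balls_in_boxes_alt, hle, if_false]
      rw [show (fun (st : Int × List (Bool × Int × List Int)) cap =>
            (st.1 - max cap 0, st.2.flatMap (pvExpandB cap (st.1 - max cap 0))))
          = pvStepB from rfl, this]
      simp
    rw [hA, hB, pvG_vanish l n [] (by omega)]
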